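-- pv_equiv track=rewrite | github.com/qi9e/rosalind-Solved | rearBI.py | reversal_dist
-- ===== SOURCE A (Python) =====
-- def neighbors(perm):
--     n = len(perm)
--     for i in range(n):
--         for j in range(i + 2, n + 1):
--             yield perm[:i] + perm[i:j][::-1] + perm[j:]
--
-- def reversal_dist(start, target):
--     start = tuple(start)
--     target = tuple(target)
--
--     if start == target:
--         return 0
--
--     front = {start}
--     back = {target}
--
--     dist_front = {start: 0}
--     dist_back = {target: 0}
--
--     while front and back:
--         # 永远扩展较小的一边
--         if len(front) > len(back):
--             front, back = back, front
--             dist_front, dist_back = dist_back, dist_front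
--
--         new_front = set()
--
--         for current in front:
--             for nxt in neighbors(current):
--                 if nxt in dist_front:
--                     continue
--
--                 if nxt in dist_back:
--                     return dist_front[current] + 1 + dist_back[nxt]
--
--                 dist_front[nxt] = dist_front[current] + 1
--                 new_front.add(nxt)
--
--         front = new_front
-- ===== SOURCE B (Python) =====
-- # B: reachability guard (sorted multisets) + plain single-direction BFS from target
-- def neighbors(perm):
--     n = len(perm)
--     for i in range(n):
--         for j in range(i + 2, n + 1):
--             yield perm[:i] + perm[i:j][::-1] + perm[j:]
--
-- def reversal_dist(start, target):
--     start = tuple(start)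
--     target = tuple(target)
--     if start == target:
--         return 0
--     if sorted(start) != sorted(target):
--         return None
--     # plain single-direction BFS from target; return the depth at which
--     # `start` first appears as a generated neighbour
--     seen = {target}
--     frontier = [target]
--     d = 0
--     while frontier:
--         d += 1
--         next_frontier = []
--         for cur in frontier:
--             for nxt in neighbors(cur):
--                 if nxt == start:
--                     return d
--                 if nxt not in seen:
--                     seen.add(nxt)
--                     next_frontier.append(nxt)
--         frontier = next_frontier
--     return None
-- ===== Notes on version B (the rewrite author's own statement) =====
-- stated objective: simpler
-- what changed: Replaces the bidirectional meet-in-the-middle search (two frontiers, two distance dicts, smaller-side swapping, meeting-point arithmetic dist_front+1+dist_back) with an up-front sorted(start)!=sorted(target) reachability guard followed by a plain single-direction breadth-first search from target with one seen-set, one frontier list and a depth counter, returning the current depth the moment a generated neighbour equals start.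
import Mathlib
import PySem

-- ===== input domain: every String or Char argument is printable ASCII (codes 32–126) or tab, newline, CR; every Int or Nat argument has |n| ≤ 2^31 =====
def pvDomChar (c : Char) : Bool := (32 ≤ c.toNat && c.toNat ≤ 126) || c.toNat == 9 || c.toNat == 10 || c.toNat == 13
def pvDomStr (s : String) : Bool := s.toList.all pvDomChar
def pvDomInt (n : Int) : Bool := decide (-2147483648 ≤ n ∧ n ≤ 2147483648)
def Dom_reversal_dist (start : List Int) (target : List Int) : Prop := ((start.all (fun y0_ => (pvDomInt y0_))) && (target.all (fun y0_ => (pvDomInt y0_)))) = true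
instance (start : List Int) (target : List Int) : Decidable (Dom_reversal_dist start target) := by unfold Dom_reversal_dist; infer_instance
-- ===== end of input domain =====

-- B replaces A's bidirectional meet-in-the-middle search by a sorted-multisets
-- reachability guard plus a plain single-direction breadth-first search from target
-- with a seen-set and depth counter (simpler, same values).


-- ===== PORT A =====

-- neighbors(perm): all reversals perm[:i] + perm[i:j][::-1] + perm[j:], i in range(n),
-- j in range(i+2, n+1).  Slices with 0 ≤ i, i+2 ≤ j ≤ n are exact as take/drop.
def pyNeighbors (perm : List Int) : List (List Int) :=
  (List.range perm.length).flatMap (fun i =>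
    (List.range' (i + 2) (perm.length + 1 - (i + 2))).map (fun j =>
      perm.take i ++ ((perm.drop i).take (j - i)).reverse ++ perm.drop j))

-- Python's dicts/sets are hash tables; they are ported as Std.HashMap / Std.HashSet with
-- an explicit freshness check (same membership/lookup semantics; the proved theorems
-- show the returned value does not depend on any iteration order).
-- inner 'for nxt in neighbors(current)' loop; state = (dist_front, new_front);
-- Sum.inl = the early 'return dist_front[current] + 1 + dist_back[nxt]'.
-- dist_front[current] is ported as getD _ 0: the key is always present (loop invariant).
def goNbrsA (dB : Std.HashMap (List Int) Int) (cur : List Int)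
    (st : Std.HashMap (List Int) Int × List (List Int)) :
    List (List Int) → Sum Int (Std.HashMap (List Int) Int × List (List Int))
  | [] => Sum.inr st
  | nxt :: rest =>
    if st.1.contains nxt then goNbrsA dB cur st rest
    else if dB.contains nxt then Sum.inl (st.1.getD cur 0 + 1 + dB.getD nxt 0)
    else goNbrsA dB cur (st.1.insert nxt (st.1.getD cur 0 + 1), st.2 ++ [nxt]) rest

-- outer 'for current in front' loop (set iteration; the produced value is
-- order-independent, which is what the equivalence theorem proves)
def goFrontA (dB : Std.HashMap (List Int) Int)
    (st : Std.HashMap (List Int) Int × List (List Int)) :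
    List (List Int) → Sum Int (Std.HashMap (List Int) Int × List (List Int))
  | [] => Sum.inr st
  | cur :: rest =>
    match goNbrsA dB cur st (pyNeighbors cur) with
    | Sum.inl r => Sum.inl r
    | Sum.inr st' => goFrontA dB st' rest

-- 'while front and back' loop; fuel only guards termination (proved never exhausted)
def loopA : Nat → List (List Int) → List (List Int) →
    Std.HashMap (List Int) Int → Std.HashMap (List Int) Int → Option Int
  | 0, _, _, _, _ => none
  | fuel + 1, front, back, dF, dB =>
    if front = [] ∨ back = [] then none
    else
      match (if front.length > back.length then (back, front, dB, dF) else (front, back, dF, dB)) with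
      | (fr, bk, df, db) =>
        match goFrontA db (df, []) fr with
        | Sum.inl r => some r
        | Sum.inr st => loopA fuel st.2 bk st.1 db

def reversal_dist (start : List Int) (target : List Int) : Option Int :=
  if start = target then some 0
  else
    loopA (Nat.factorial start.length + Nat.factorial target.length + 2)
      [start] [target]
      ((∅ : Std.HashMap (List Int) Int).insert start 0)
      ((∅ : Std.HashMap (List Int) Int).insert target 0)

-- ===== PORT B =====

-- inner 'for nxt in neighbors(cur)' loop of Source B; state = (seen, next_frontier);
-- Sum.inl = the early 'return d' (the value d is supplied by the caller)
def goNbrsB (start : List Int) (st : Std.HashSet (List Int) × List (List Int)) :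
    List (List Int) → Sum Unit (Std.HashSet (List Int) × List (List Int))
  | [] => Sum.inr st
  | nxt :: rest =>
    if nxt = start then Sum.inl ()
    else if st.1.contains nxt then goNbrsB start st rest
    else goNbrsB start (st.1.insert nxt, st.2 ++ [nxt]) rest

-- outer 'for cur in frontier' loop of Source B
def goFrontB (start : List Int) (st : Std.HashSet (List Int) × List (List Int)) :
    List (List Int) → Sum Unit (Std.HashSet (List Int) × List (List Int))
  | [] => Sum.inr st
  | cur :: rest =>
    match goNbrsB start st (pyNeighbors cur) with
    | Sum.inl r => Sum.inl r
    | Sum.inr st' => goFrontB start st' rest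

-- 'while frontier' loop of Source B; fuel only guards termination (proved never exhausted)
def loopBfs (start : List Int) : Nat → Std.HashSet (List Int) → List (List Int) → Int → Option Int
  | 0, _, _, _ => none
  | fuel + 1, seen, frontier, d =>
    if frontier = [] then none
    else
      match goFrontB start (seen, []) frontier with
      | Sum.inl _ => some (d + 1)
      | Sum.inr st => loopBfs start fuel st.1 st.2 (d + 1)

def reversal_dist_alt (start : List Int) (target : List Int) : Option Int :=
  if start = target then some 0
  else if PySem.List.sorted start (fun x => x) false ≠ PySem.List.sorted target (fun x => x) false then
    none
  else
    loopBfs start (Nat.factorial target.length + 1)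
      ((∅ : Std.HashSet (List Int)).insert target) [target] 0

-- ===== PRECONDITION & SPEC =====
def Spec_reversal_dist (start : List Int) (target : List Int) (out : Option Int) : Prop := out = reversal_dist_alt start target
instance (start : List Int) (target : List Int) (out : Option Int) : Decidable (Spec_reversal_dist start target out) := by unfold Spec_reversal_dist; infer_instance

-- ===== CLAIM (what is proved, stated in full; the proofs are below) =====
def Claim_equal_reversal_dist : Prop := ∀ (start : List Int) (target : List Int), Dom_reversal_dist start target → Spec_reversal_dist start target (reversal_dist start target)

-- ===== LEMMAS AND PROOFS =====

-- one segment reversal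
def revseg (p : List Int) (i j : Nat) : List Int :=
  p.take i ++ ((p.drop i).take (j - i)).reverse ++ p.drop j

-- edge of the reversal graph
def rStep (p q : List Int) : Prop := q ∈ pyNeighbors p

-- paths of length exactly d (last-step recursion)
def reachN : Nat → List Int → List Int → Prop
  | 0, p, q => p = q
  | d + 1, p, q => ∃ r, reachN d p r ∧ rStep r q

def ballP (u : List Int) (f : Nat) (x : List Int) : Prop := ∃ e ≤ f, reachN e u x

-- x is at distance exactly m from u
def minR (u : List Int) (x : List Int) (m : Nat) : Prop :=
  reachN m u x ∧ ∀ e, reachN e u x → m ≤ e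

-- what both programs return: none iff unreachable, else the exact distance
def ResultSpec (s t : List Int) (o : Option Int) : Prop :=
  (o = none ∧ ∀ e, ¬ reachN e s t) ∨ (∃ D : Nat, o = some (D : Int) ∧ minR s t D)

def KeysBall (u : List Int) (f : Nat) (d : Std.HashMap (List Int) Int) : Prop :=
  (∀ x, x ∈ d ↔ ballP u f x) ∧
    (∀ x m, x ∈ d → minR u x m → d.getD x 0 = (m : Int))

def LayerL (u : List Int) (f : Nat) (l : List (List Int)) : Prop :=
  ∀ x, x ∈ l ↔ minR u x f

def Orient (u v s t : List Int) : Prop := (u = s ∧ v = t) ∨ (u = t ∧ v = s)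

def InvA (s t : List Int) (front back : List (List Int))
    (dF dB : Std.HashMap (List Int) Int) : Prop :=
  ∃ u v f b, Orient u v s t ∧ KeysBall u f dF ∧ KeysBall v b dB ∧
    LayerL u f front ∧ LayerL v b back ∧ (∀ x, ballP u f x → ¬ ballP v b x)

-- mid-expansion invariant for A's inner loops (st.2 = the new_front set so far)
def MidA (u v : List Int) (f b : Nat) (dB : Std.HashMap (List Int) Int)
    (st : Std.HashMap (List Int) Int × List (List Int)) : Prop :=
  (∀ x, x ∈ st.1 ↔ (ballP u f x ∨ x ∈ st.2)) ∧
  (∀ x, x ∈ st.2 → minR u x (f + 1) ∧ x ∉ dB) ∧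
  (∀ x m, x ∈ st.1 → minR u x m → st.1.getD x 0 = (m : Int))

-- mid-expansion invariant for B's inner loops (st.2 = next_frontier so far)
def MidB (t : List Int) (d : Nat)
    (st : Std.HashSet (List Int) × List (List Int)) : Prop :=
  (∀ x, x ∈ st.1 ↔ (ballP t d x ∨ x ∈ st.2)) ∧
  (∀ x, x ∈ st.2 → minR t x (d + 1))

-- ---- graph basics ----

theorem mem_pyNeighbors (p q : List Int) :
    q ∈ pyNeighbors p ↔ ∃ i j, i + 2 ≤ j ∧ j ≤ p.length ∧ q = revseg p i j := by
  unfold pyNeighbors revseg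
  simp only [List.mem_flatMap, List.mem_map, List.mem_range, List.mem_range'_1]
  constructor
  · rintro ⟨i, hi, j, ⟨hj1, hj2⟩, rfl⟩
    exact ⟨i, j, hj1, by omega, rfl⟩
  · rintro ⟨i, j, hj1, hj2, rfl⟩
    exact ⟨i, by omega, j, ⟨hj1, by omega⟩, rfl⟩

theorem length_revseg (p : List Int) (i j : Nat) (hij : i ≤ j) (hj : j ≤ p.length) :
    (revseg p i j).length = p.length := by
  simp only [revseg, List.length_append, List.length_reverse, List.length_take,
    List.length_drop]
  omega

theorem revseg_append (i j : Nat) (A M B : List Int) (hA : A.length = i)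
    (hM : M.length = j - i) (hAM : (A ++ M).length = j) :
    revseg (A ++ M ++ B) i j = A ++ M.reverse ++ B := by
  unfold revseg
  rw [List.drop_left' hAM]
  rw [show A ++ M ++ B = A ++ (M ++ B) from List.append_assoc A M B]
  rw [List.take_left' hA, List.drop_left' hA, List.take_left' hM]

theorem split_revseg (p : List Int) (i j : Nat) (hij : i ≤ j) (hj : j ≤ p.length) :
    p = p.take i ++ (p.drop i).take (j - i) ++ p.drop j := by
  have hdd : p.drop j = ((p.drop i).drop (j - i)) := by
    rw [List.drop_drop]; congr 1; omega
  rw [List.append_assoc, hdd, List.take_append_drop, List.take_append_drop]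

theorem revseg_revseg (p : List Int) (i j : Nat) (hij : i ≤ j) (hj : j ≤ p.length) :
    revseg (revseg p i j) i j = p := by
  have hA : (p.take i).length = i := by simp; omega
  have hM : ((p.drop i).take (j - i)).length = j - i := by simp; omega
  have h1 : revseg p i j =
      p.take i ++ ((p.drop i).take (j - i)).reverse ++ p.drop j := rfl
  rw [h1, revseg_append i j _ _ _ hA (by simp [hM]) (by simp [hA, hM]; omega),
    List.reverse_reverse]
  exact (split_revseg p i j hij hj).symm

theorem revseg_perm (p : List Int) (i j : Nat) (hij : i ≤ j) (hj : j ≤ p.length) :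
    (revseg p i j).Perm p := by
  have h1 : revseg p i j =
      p.take i ++ ((p.drop i).take (j - i)).reverse ++ p.drop j := rfl
  rw [h1]
  nth_rewrite 4 [split_revseg p i j hij hj]
  rw [List.append_assoc, List.append_assoc]
  exact ((List.reverse_perm _).append_right _).append_left _

theorem rStep_symm {p q : List Int} (h : rStep p q) : rStep q p := by
  rw [rStep, mem_pyNeighbors] at h
  obtain ⟨i, j, h1, h2, rfl⟩ := h
  rw [rStep, mem_pyNeighbors]
  refine ⟨i, j, h1, ?_, ?_⟩
  · rw [length_revseg p i j (by omega) h2]; exact h2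
  · rw [revseg_revseg p i j (by omega) h2]

theorem rStep_perm {p q : List Int} (h : rStep p q) : q.Perm p := by
  rw [rStep, mem_pyNeighbors] at h
  obtain ⟨i, j, h1, h2, rfl⟩ := h
  exact revseg_perm p i j (by omega) h2

theorem reachN_cons {p r q : List Int} {d : Nat} (h1 : rStep p r) (h2 : reachN d r q) :
    reachN (d + 1) p q := by
  induction d generalizing q with
  | zero => subst h2; exact ⟨p, rfl, h1⟩
  | succ d ih =>
    obtain ⟨w, hw, hs⟩ := h2
    exact ⟨w, ih hw, hs⟩

theorem reachN_symm {p q : List Int} {d : Nat} (h : reachN d p q) : reachN d q p := by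
  induction d generalizing q with
  | zero => subst h; rfl
  | succ d ih =>
    obtain ⟨r, hr, hs⟩ := h
    exact reachN_cons (rStep_symm hs) (ih hr)

theorem reachN_trans {u x v : List Int} {a c : Nat} (h1 : reachN a u x) (h2 : reachN c x v) :
    reachN (a + c) u v := by
  induction c generalizing v with
  | zero => subst h2; exact h1
  | succ c ih =>
    obtain ⟨r, hr, hs⟩ := h2
    exact ⟨r, ih hr, hs⟩

theorem reachN_mid {u v : List Int} {D k : Nat} (h : reachN D u v) (hk : k ≤ D) :
    ∃ w, reachN k u w ∧ reachN (D - k) w v := by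
  induction D generalizing v with
  | zero =>
    have hk0 : k = 0 := by omega
    subst hk0; subst h
    exact ⟨u, rfl, rfl⟩
  | succ D ih =>
    obtain ⟨r, hr, hs⟩ := h
    by_cases hkD : k = D + 1
    · subst hkD
      exact ⟨v, ⟨r, hr, hs⟩, by simp [reachN]⟩
    · have hk' : k ≤ D := by omega
      obtain ⟨w, hw1, hw2⟩ := ih hr hk'
      have : D + 1 - k = (D - k) + 1 := by omega
      rw [this]
      exact ⟨w, hw1, ⟨r, hw2, hs⟩⟩

theorem exists_minR {u x : List Int} {e : Nat} (h : reachN e u x) :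
    ∃ m, m ≤ e ∧ minR u x m := by
  induction e using Nat.strong_induction_on with
  | _ e ih =>
    by_cases h' : ∃ e' < e, reachN e' u x
    · obtain ⟨e', he', hre'⟩ := h'
      obtain ⟨m, hm, hmin⟩ := ih e' he' hre'
      exact ⟨m, by omega, hmin⟩
    · push_neg at h'
      exact ⟨e, le_refl _, h, fun e2 hre2 => by
        by_contra hc; push_neg at hc; exact absurd hre2 (h' e2 hc)⟩

theorem minR_pred {u x : List Int} {k : Nat} (h : minR u x (k + 1)) :
    ∃ y, minR u y k ∧ rStep y x := by
  obtain ⟨⟨r, hr, hs⟩, hmin⟩ := h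
  obtain ⟨m, hm, hminr⟩ := exists_minR hr
  have hmk : m = k := by
    by_contra hc
    have hlt : m < k := by omega
    have : reachN (m + 1) u x := ⟨r, hminr.1, hs⟩
    have := hmin _ this
    omega
  subst hmk
  exact ⟨r, hminr, hs⟩

theorem minR_downward {u x : List Int} {m : Nat} (h : minR u x m) :
    ∀ k ≤ m, ∃ y, minR u y k := by
  induction m generalizing x with
  | zero =>
    intro k hk
    have hk0 : k = 0 := by omega
    subst hk0
    exact ⟨x, h⟩
  | succ m ih =>
    intro k hk
    by_cases hkm : k = m + 1
    · subst hkm; exact ⟨x, h⟩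
    · obtain ⟨y, hy, -⟩ := minR_pred h
      exact ih hy k (by omega)

theorem reachN_permOf {u x : List Int} {e : Nat} (h : reachN e u x) : x.Perm u := by
  induction e generalizing x with
  | zero => subst h; exact List.Perm.refl _
  | succ e ih =>
    obtain ⟨r, hr, hs⟩ := h
    exact (rStep_perm hs).trans (ih hr)

theorem minR_symm {u v : List Int} {m : Nat} (h : minR u v m) : minR v u m := by
  exact ⟨reachN_symm h.1, fun e he => h.2 e (reachN_symm he)⟩

theorem ball_succ_iff (u x : List Int) (f : Nat) :
    ballP u (f + 1) x ↔ ballP u f x ∨ minR u x (f + 1) := by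
  constructor
  · rintro ⟨e, he, hr⟩
    obtain ⟨m, hm, hmin⟩ := exists_minR hr
    by_cases hmf : m ≤ f
    · exact Or.inl ⟨m, hmf, hmin.1⟩
    · have : m = f + 1 := by omega
      subst this; exact Or.inr hmin
  · rintro (⟨e, he, hr⟩ | h)
    · exact ⟨e, by omega, hr⟩
    · exact ⟨f + 1, le_refl _, h.1⟩

theorem minR_not_ball {u x : List Int} {f : Nat} (h : minR u x (f + 1)) : ¬ ballP u f x := by
  rintro ⟨e, he, hr⟩
  have := h.2 e hr
  omega

-- if the layer at F is empty and v is not in the ball of radius F, v is unreachable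
theorem unreach_of_layer_empty {u v : List Int} {F : Nat}
    (hl : ∀ x, ¬ minR u x F) (hv : ¬ ballP u F v) : ∀ e, ¬ reachN e u v := by
  intro e hre
  obtain ⟨m, hm, hmin⟩ := exists_minR hre
  by_cases hmF : m ≤ F
  · exact hv ⟨m, hmF, hmin.1⟩
  · obtain ⟨y, hy⟩ := minR_downward hmin F (by omega)
    exact hl y hy

-- the meeting lemma: A's meeting return produces the exact distance
theorem meet_lemma {u v x : List Int} {f b m : Nat}
    (hd : ∀ y, ballP u f y → ¬ ballP v b y)
    (hux : reachN (f + 1) u x) (hm : minR v x m) (hmb : m ≤ b) :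
    minR u v (f + 1 + m) ∧ m = b := by
  have hxv : reachN m x v := reachN_symm hm.1
  have huv : reachN (f + 1 + m) u v := reachN_trans hux hxv
  obtain ⟨D, hDle, hD⟩ := exists_minR huv
  have hlow : f + b + 1 ≤ D := by
    by_contra hc
    push_neg at hc
    by_cases hDf : D ≤ f
    · exact hd v ⟨D, hDf, hD.1⟩ ⟨0, Nat.zero_le _, by simp [reachN]⟩
    · push_neg at hDf
      obtain ⟨w, hw1, hw2⟩ := reachN_mid hD.1 (le_of_lt hDf)
      exact hd w ⟨f, le_refl _, hw1⟩ ⟨D - f, by omega, reachN_symm hw2⟩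
  have hDeq : D = f + 1 + m ∧ m = b := by omega
  exact ⟨hDeq.1 ▸ hD, hDeq.2⟩

-- ---- counting ----

theorem length_le_of_nodup_subset {α : Type} [DecidableEq α] {l L : List α}
    (hn : l.Nodup) (hs : ∀ x ∈ l, x ∈ L) : l.length ≤ L.length := by
  calc l.length = l.toFinset.card := (List.toFinset_card_of_nodup hn).symm
    _ ≤ L.toFinset.card := Finset.card_le_card (fun a ha => by
        rw [List.mem_toFinset] at *; exact hs a ha)
    _ ≤ L.length := L.toFinset_card_le

theorem length_lt_of_nodup_ssubset {α : Type} [DecidableEq α] {l L : List α}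
    (hn : l.Nodup) (hs : ∀ x ∈ l, x ∈ L) {x : α}
    (hx : x ∈ L) (hnx : x ∉ l) : l.length < L.length := by
  have hss : l.toFinset ⊂ L.toFinset := by
    constructor
    · intro a ha; rw [List.mem_toFinset] at *; exact hs a ha
    · intro hsup
      exact hnx (by
        have := hsup (List.mem_toFinset.mpr hx)
        exact List.mem_toFinset.mp this)
  calc l.length = l.toFinset.card := (List.toFinset_card_of_nodup hn).symm
    _ < L.toFinset.card := Finset.card_lt_card hss
    _ ≤ L.length := L.toFinset_card_le

theorem ball_subset_perms {u x : List Int} {f : Nat} (h : ballP u f x) :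
    x ∈ u.permutations := by
  obtain ⟨e, he, hr⟩ := h
  exact List.mem_permutations.mpr (reachN_permOf hr)

-- ---- hash map / hash set bridges ----

theorem hm_mem_insert (m : Std.HashMap (List Int) Int) (k x : List Int) (v : Int) :
    x ∈ m.insert k v ↔ x = k ∨ x ∈ m := by
  rw [Std.HashMap.mem_insert]
  constructor
  · rintro (h | h)
    · exact Or.inl (beq_iff_eq.mp h).symm
    · exact Or.inr h
  · rintro (h | h)
    · exact Or.inl (beq_iff_eq.mpr h.symm)
    · exact Or.inr h

theorem hm_getD_insert_of_ne (m : Std.HashMap (List Int) Int) {k x : List Int}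
    (v d0 : Int) (h : x ≠ k) : (m.insert k v).getD x d0 = m.getD x d0 := by
  rw [Std.HashMap.getD_insert, if_neg]
  simp only [beq_iff_eq]
  exact fun hh => h hh.symm

theorem hm_keys_nodup (m : Std.HashMap (List Int) Int) : m.keys.Nodup := by
  have h := Std.HashMap.distinct_keys (m := m)
  exact h.imp (fun hab => by simpa using hab)

theorem hs_mem_insert (s : Std.HashSet (List Int)) (k x : List Int) :
    x ∈ s.insert k ↔ x = k ∨ x ∈ s := by
  rw [Std.HashSet.mem_insert]
  constructor
  · rintro (h | h)
    · exact Or.inl (beq_iff_eq.mp h).symm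
    · exact Or.inr h
  · rintro (h | h)
    · exact Or.inl (beq_iff_eq.mpr h.symm)
    · exact Or.inr h

theorem hs_toList_nodup (s : Std.HashSet (List Int)) : s.toList.Nodup := by
  have h := Std.HashSet.distinct_toList (m := s)
  exact h.imp (fun hab => by simpa using hab)

theorem KeysBall_size_le {u : List Int} {f : Nat} {d : Std.HashMap (List Int) Int}
    (h : KeysBall u f d) : d.size ≤ Nat.factorial u.length := by
  rw [← Std.HashMap.length_keys, ← List.length_permutations]
  exact length_le_of_nodup_subset (hm_keys_nodup d)
    (fun x hx => ball_subset_perms ((h.1 x).mp (Std.HashMap.mem_keys.mp hx)))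

theorem seen_size_le {u : List Int} {f : Nat} {S : Std.HashSet (List Int)}
    (h : ∀ x, x ∈ S → ballP u f x) : S.size ≤ Nat.factorial u.length := by
  rw [← Std.HashSet.length_toList, ← List.length_permutations]
  exact length_le_of_nodup_subset (hs_toList_nodup S)
    (fun x hx => ball_subset_perms (h x (Std.HashSet.mem_toList.mp hx)))

-- ---- A-side fold lemmas ----

theorem MidA_keys_mono {u v : List Int} {f b : Nat} {dB : Std.HashMap (List Int) Int}
    {st st' : Std.HashMap (List Int) Int × List (List Int)}
    (h1 : MidA u v f b dB st) (h2 : MidA u v f b dB st')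
    (hsub : ∀ y ∈ st.2, y ∈ st'.2) : ∀ x ∈ st.1, x ∈ st'.1 := by
  intro x hx
  rcases (h1.1 x).mp hx with hball | hmem
  · exact (h2.1 x).mpr (Or.inl hball)
  · exact (h2.1 x).mpr (Or.inr (hsub x hmem))

theorem goNbrsA_spec {u v : List Int} {f b : Nat} {dB : Std.HashMap (List Int) Int}
    (hd : ∀ y, ballP u f y → ¬ ballP v b y) (hB : KeysBall v b dB)
    {cur : List Int} (hcur : minR u cur f) :
    ∀ (ns : List (List Int)) (st : Std.HashMap (List Int) Int × List (List Int)),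
      MidA u v f b dB st → (∀ x ∈ ns, rStep cur x) →
      (match goNbrsA dB cur st ns with
       | Sum.inl r => ∃ D : Nat, minR u v D ∧ r = (D : Int)
       | Sum.inr st' => MidA u v f b dB st' ∧ (∀ y, y ∈ st.2 → y ∈ st'.2) ∧
           (∀ x ∈ ns, x ∈ st'.1)) := by
  intro ns
  induction ns with
  | nil =>
    intro st hMid _
    simp only [goNbrsA]
    exact ⟨hMid, fun y hy => hy, by simp⟩
  | cons nxt rest ih =>
    intro st hMid hns
    obtain ⟨hkeys, hnew, hval⟩ := hMid
    have hMidst : MidA u v f b dB st := ⟨hkeys, hnew, hval⟩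
    have hstep : rStep cur nxt := hns nxt (by simp)
    have hrest : ∀ x ∈ rest, rStep cur x := fun x hx => hns x (by simp [hx])
    have hcurkey : cur ∈ st.1 := (hkeys cur).mpr (Or.inl ⟨f, le_refl _, hcur.1⟩)
    have hcurval : st.1.getD cur 0 = (f : Int) := hval cur f hcurkey hcur
    have hux : reachN (f + 1) u nxt := ⟨cur, hcur.1, hstep⟩
    simp only [goNbrsA]
    by_cases hc : st.1.contains nxt = true
    · rw [if_pos hc]
      have hres := ih st hMidst hrest
      cases hgo : goNbrsA dB cur st rest with
      | inl r => rw [hgo] at hres; exact hres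
      | inr st' =>
        rw [hgo] at hres
        obtain ⟨hMid', hmono, hkeys'⟩ := hres
        refine ⟨hMid', hmono, ?_⟩
        intro x hx
        rcases List.mem_cons.mp hx with rfl | hxr
        · exact MidA_keys_mono hMidst hMid' hmono x (Std.HashMap.contains_iff_mem.mp hc)
        · exact hkeys' x hxr
    · rw [if_neg hc]
      have hnotmem : nxt ∉ st.1 := fun h => hc (Std.HashMap.contains_iff_mem.mpr h)
      by_cases hc2 : dB.contains nxt = true
      · rw [if_pos hc2]
        have hnB : nxt ∈ dB := Std.HashMap.contains_iff_mem.mp hc2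
        obtain ⟨hBiff, hBval⟩ := hB
        obtain ⟨e, heb, hre⟩ := (hBiff nxt).mp hnB
        obtain ⟨m, hme, hmin⟩ := exists_minR hre
        have hBv : dB.getD nxt 0 = (m : Int) := hBval nxt m hnB hmin
        obtain ⟨hmr, hmb⟩ := meet_lemma hd hux hmin (by omega)
        refine ⟨f + 1 + m, hmr, ?_⟩
        rw [hcurval, hBv]
        push_cast
        ring
      · rw [if_neg hc2]
        have hnotB : nxt ∉ dB := fun h => hc2 (Std.HashMap.contains_iff_mem.mpr h)
        have hnxtmin : minR u nxt (f + 1) := by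
          refine ⟨hux, fun e he => ?_⟩
          by_contra hce
          push_neg at hce
          exact hnotmem ((hkeys nxt).mpr (Or.inl ⟨e, by omega, he⟩))
        have hMid2 : MidA u v f b dB
            (st.1.insert nxt (st.1.getD cur 0 + 1), st.2 ++ [nxt]) := by
          refine ⟨?_, ?_, ?_⟩
          · intro x
            rw [hm_mem_insert, List.mem_append, List.mem_singleton]
            have := hkeys x
            tauto
          · intro x hx
            rcases List.mem_append.mp hx with hold | hq
            · exact hnew x hold
            · rw [List.mem_singleton] at hq
              subst hq
              exact ⟨hnxtmin, hnotB⟩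
          · intro x m hxk hxm
            by_cases hxn : x = nxt
            · subst hxn
              have hm1 : m = f + 1 := le_antisymm (hxm.2 _ hnxtmin.1) (hnxtmin.2 _ hxm.1)
              rw [Std.HashMap.getD_insert_self, hcurval, hm1]
              push_cast
              ring
            · rw [hm_getD_insert_of_ne _ _ _ hxn]
              rcases (hm_mem_insert _ _ _ _).mp hxk with h' | h'
              · exact absurd h' hxn
              · exact hval x m h' hxm
        have hres := ih _ hMid2 hrest
        cases hgo : goNbrsA dB cur
            (st.1.insert nxt (st.1.getD cur 0 + 1), st.2 ++ [nxt]) rest with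
        | inl r => rw [hgo] at hres; exact hres
        | inr st' =>
          rw [hgo] at hres
          obtain ⟨hMid', hmono, hkeys'⟩ := hres
          refine ⟨hMid', fun y hy => hmono y (by simp [hy]), ?_⟩
          intro x hx
          rcases List.mem_cons.mp hx with rfl | hxr
          · exact MidA_keys_mono hMid2 hMid'
              (fun y hy => hmono y hy) x ((hm_mem_insert _ _ _ _).mpr (Or.inl rfl))
          · exact hkeys' x hxr

theorem goFrontA_spec {u v : List Int} {f b : Nat} {dB : Std.HashMap (List Int) Int}
    (hd : ∀ y, ballP u f y → ¬ ballP v b y) (hB : KeysBall v b dB) :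
    ∀ (frs : List (List Int)) (st : Std.HashMap (List Int) Int × List (List Int)),
      MidA u v f b dB st → (∀ cur ∈ frs, minR u cur f) →
      (match goFrontA dB st frs with
       | Sum.inl r => ∃ D : Nat, minR u v D ∧ r = (D : Int)
       | Sum.inr st' => MidA u v f b dB st' ∧ (∀ y, y ∈ st.2 → y ∈ st'.2) ∧
           (∀ cur ∈ frs, ∀ x, rStep cur x → x ∈ st'.1)) := by
  intro frs
  induction frs with
  | nil =>
    intro st hMid _
    simp only [goFrontA]
    exact ⟨hMid, fun y hy => hy, by simp⟩
  | cons cur rest ih =>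
    intro st hMid hfr
    have hcur : minR u cur f := hfr cur (by simp)
    have hres := goNbrsA_spec hd hB hcur (pyNeighbors cur) st hMid (fun x hx => hx)
    cases hgo : goNbrsA dB cur st (pyNeighbors cur) with
    | inl r =>
      rw [hgo] at hres
      simp only [goFrontA, hgo]
      exact hres
    | inr st' =>
      rw [hgo] at hres
      simp only [goFrontA, hgo]
      obtain ⟨hMid', hmono, hkeys'⟩ := hres
      have hres2 := ih st' hMid' (fun c hc => hfr c (by simp [hc]))
      cases hgo2 : goFrontA dB st' rest with
      | inl r => rw [hgo2] at hres2; exact hres2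
      | inr st'' =>
        rw [hgo2] at hres2
        obtain ⟨hMid'', hmono2, hkeys''⟩ := hres2
        refine ⟨hMid'', fun y hy => hmono2 y (hmono y hy), ?_⟩
        intro c hc x hstep
        rcases List.mem_cons.mp hc with rfl | hcr
        · exact MidA_keys_mono hMid' hMid'' hmono2 x (hkeys' x hstep)
        · exact hkeys'' c hcr x hstep

theorem InvA_swap {s t : List Int} {front back : List (List Int)}
    {dF dB : Std.HashMap (List Int) Int} (h : InvA s t front back dF dB) :
    InvA s t back front dB dF := by
  obtain ⟨u, v, f, b, ho, hF, hB, hfr, hbk, hd⟩ := h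
  refine ⟨v, u, b, f, ?_, hB, hF, hbk, hfr, fun x h1 h2 => hd x h2 h1⟩
  rcases ho with ⟨h1, h2⟩ | ⟨h1, h2⟩
  · exact Or.inr ⟨h2, h1⟩
  · exact Or.inl ⟨h2, h1⟩

theorem unreach_orient {u v s t : List Int} (ho : Orient u v s t)
    (h : ∀ e, ¬ reachN e u v) : ∀ e, ¬ reachN e s t := by
  rcases ho with ⟨rfl, rfl⟩ | ⟨rfl, rfl⟩
  · exact h
  · exact fun e he => h e (reachN_symm he)

theorem minR_orient {u v s t : List Int} {D : Nat} (ho : Orient u v s t)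
    (h : minR u v D) : minR s t D := by
  rcases ho with ⟨rfl, rfl⟩ | ⟨rfl, rfl⟩
  · exact h
  · exact minR_symm h

theorem ball_zero (u x : List Int) : ballP u 0 x ↔ u = x := by
  constructor
  · rintro ⟨e, he, hr⟩
    have he0 : e = 0 := by omega
    subst he0
    exact hr
  · intro h
    exact ⟨0, le_refl _, h⟩

theorem minR_zero (u x : List Int) : minR u x 0 ↔ u = x := by
  constructor
  · exact fun h => h.1
  · exact fun h => ⟨h, fun e _ => Nat.zero_le _⟩

theorem loopA_correct (s t : List Int) :
    ∀ (fuel : Nat) (front back : List (List Int)) (dF dB : Std.HashMap (List Int) Int),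
      InvA s t front back dF dB →
      Nat.factorial s.length + Nat.factorial t.length + 2 ≤ fuel + dF.size + dB.size →
      ResultSpec s t (loopA fuel front back dF dB) := by
  intro fuel
  induction fuel with
  | zero =>
    intro front back dF dB hInv hfuel
    exfalso
    obtain ⟨u, v, f, b, ho, hF, hB, hfr, hbk, hd⟩ := hInv
    have h1 := KeysBall_size_le hF
    have h2 := KeysBall_size_le hB
    rcases ho with ⟨rfl, rfl⟩ | ⟨rfl, rfl⟩ <;> omega
  | succ fuel ih =>
    intro front back dF dB hInv hfuel
    simp only [loopA]
    by_cases hempty : front = [] ∨ back = []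
    · rw [if_pos hempty]
      obtain ⟨u, v, f, b, ho, hF, hB, hfr, hbk, hd⟩ := hInv
      have hvball : ballP v b v := ⟨0, Nat.zero_le _, by simp [reachN]⟩
      have huball : ballP u f u := ⟨0, Nat.zero_le _, by simp [reachN]⟩
      have hunreach : ∀ e, ¬ reachN e u v := by
        rcases hempty with he | he
        · apply unreach_of_layer_empty (F := f)
          · intro x hx
            have hmem := (hfr x).mpr hx
            rw [he] at hmem
            simp at hmem
          · exact fun hb' => hd v hb' hvball
        · intro e hre
          have hunv : ∀ e, ¬ reachN e v u := by
            apply unreach_of_layer_empty (F := b)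
            · intro x hx
              have hmem := (hbk x).mpr hx
              rw [he] at hmem
              simp at hmem
            · exact fun hb' => hd u huball hb'
          exact hunv e (reachN_symm hre)
      exact Or.inl ⟨rfl, unreach_orient ho hunreach⟩
    · rw [if_neg hempty]
      have hswap : ∀ (fr bk : List (List Int)) (df db : Std.HashMap (List Int) Int),
          InvA s t fr bk df db →
          Nat.factorial s.length + Nat.factorial t.length + 2 ≤
            fuel + 1 + df.size + db.size →
          ResultSpec s t (match goFrontA db (df, []) fr with
            | Sum.inl r => some r
            | Sum.inr st => loopA fuel st.2 bk st.1 db) := by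
        intro fr bk df db hInv2 hfuel2
        obtain ⟨u, v, f, b, ho, hF, hB, hfr2, hbk2, hd⟩ := hInv2
        have hMid0 : MidA u v f b db (df, []) := by
          refine ⟨?_, ?_, hF.2⟩
          · intro x
            simp only [List.not_mem_nil, or_false]
            exact hF.1 x
          · intro x hx
            simp at hx
        have hres := goFrontA_spec hd hB fr (df, []) hMid0
          (fun c hc => (hfr2 c).mp hc)
        cases hgo : goFrontA db (df, []) fr with
        | inl r =>
          rw [hgo] at hres
          obtain ⟨D, hmr, rfl⟩ := hres
          exact Or.inr ⟨D, rfl, minR_orient ho hmr⟩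
        | inr st =>
          show ResultSpec s t (loopA fuel st.2 bk st.1 db)
          rw [hgo] at hres
          obtain ⟨hMid', hmono, hcomp⟩ := hres
          obtain ⟨hkeys', hnew', hval'⟩ := hMid'
          have hlay : ∀ x, x ∈ st.2 ↔ minR u x (f + 1) := by
            intro x
            constructor
            · exact fun h => (hnew' x h).1
            · intro hm
              obtain ⟨y, hy, hs⟩ := minR_pred hm
              have hxk : x ∈ st.1 := hcomp y ((hfr2 y).mpr hy) x hs
              rcases (hkeys' x).mp hxk with hb' | h2
              · exact absurd hb' (minR_not_ball hm)
              · exact h2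
          by_cases hnf : st.2 = []
          · have hnone : loopA fuel st.2 bk st.1 db = none := by
              rw [hnf]
              cases fuel <;> simp [loopA]
            rw [hnone]
            refine Or.inl ⟨rfl, unreach_orient ho ?_⟩
            apply unreach_of_layer_empty (F := f + 1)
            · intro x hx
              have hmem := (hlay x).mpr hx
              rw [hnf] at hmem
              simp at hmem
            · intro hb'
              rcases (ball_succ_iff u v f).mp hb' with h1 | h2
              · exact hd v h1 ⟨0, Nat.zero_le _, by simp [reachN]⟩
              · have hmem := (hlay v).mpr h2
                rw [hnf] at hmem
                simp at hmem
          · have hInv3 : InvA s t st.2 bk st.1 db := by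
              refine ⟨u, v, f + 1, b, ho, ⟨?_, hval'⟩, hB, hlay, hbk2, ?_⟩
              · intro x
                have hor : (ballP u f x ∨ x ∈ st.2) ↔
                    (ballP u f x ∨ minR u x (f + 1)) := or_congr Iff.rfl (hlay x)
                rw [hkeys' x, hor, ← ball_succ_iff]
              · intro x hb' hbv
                rcases (ball_succ_iff u x f).mp hb' with h1 | h2
                · exact hd x h1 hbv
                · exact (hnew' x ((hlay x).mpr h2)).2 ((hB.1 x).mpr hbv)
            have hsub : ∀ x ∈ df.keys, x ∈ st.1.keys := fun x hx =>
              Std.HashMap.mem_keys.mpr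
                ((hkeys' x).mpr (Or.inl ((hF.1 x).mp (Std.HashMap.mem_keys.mp hx))))
            obtain ⟨x0, hx0⟩ := List.exists_mem_of_ne_nil _ hnf
            have hx0k : x0 ∈ st.1.keys :=
              Std.HashMap.mem_keys.mpr ((hkeys' x0).mpr (Or.inr hx0))
            have hx0n : x0 ∉ df.keys := fun h =>
              minR_not_ball ((hlay x0).mp hx0)
                ((hF.1 x0).mp (Std.HashMap.mem_keys.mp h))
            have hlt : df.keys.length < st.1.keys.length :=
              length_lt_of_nodup_ssubset (hm_keys_nodup df) hsub hx0k hx0n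
            rw [Std.HashMap.length_keys, Std.HashMap.length_keys] at hlt
            exact ih st.2 bk st.1 db hInv3 (by omega)
      by_cases hlen : front.length > back.length
      · rw [if_pos hlen]
        exact hswap back front dB dF (InvA_swap hInv) (by omega)
      · rw [if_neg hlen]
        exact hswap front back dF dB hInv (by omega)

-- ---- B-side fold lemmas ----

theorem MidB_mono {t : List Int} {d : Nat}
    {st st' : Std.HashSet (List Int) × List (List Int)}
    (h1 : MidB t d st) (h2 : MidB t d st')
    (hsub : ∀ y ∈ st.2, y ∈ st'.2) : ∀ x ∈ st.1, x ∈ st'.1 := by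
  intro x hx
  rcases (h1.1 x).mp hx with hball | hmem
  · exact (h2.1 x).mpr (Or.inl hball)
  · exact (h2.1 x).mpr (Or.inr (hsub x hmem))

theorem goNbrsB_spec {s t : List Int} {d : Nat}
    (hns2 : ¬ ballP t d s) {cur : List Int} (hcur : minR t cur d) :
    ∀ (ns : List (List Int)) (st : Std.HashSet (List Int) × List (List Int)),
      MidB t d st → (∀ x ∈ ns, rStep cur x) →
      (match goNbrsB s st ns with
       | Sum.inl _ => minR t s (d + 1)
       | Sum.inr st' => MidB t d st' ∧ (∀ y, y ∈ st.2 → y ∈ st'.2) ∧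
           (∀ x ∈ ns, x ≠ s ∧ x ∈ st'.1)) := by
  intro ns
  induction ns with
  | nil =>
    intro st hMid _
    simp only [goNbrsB]
    exact ⟨hMid, fun y hy => hy, by simp⟩
  | cons nxt rest ih =>
    intro st hMid hns
    obtain ⟨hkeys, hnew⟩ := hMid
    have hMidst : MidB t d st := ⟨hkeys, hnew⟩
    have hstep : rStep cur nxt := hns nxt (by simp)
    have hrest : ∀ x ∈ rest, rStep cur x := fun x hx => hns x (by simp [hx])
    have hrch : reachN (d + 1) t nxt := ⟨cur, hcur.1, hstep⟩
    simp only [goNbrsB]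
    by_cases hse : nxt = s
    · rw [if_pos hse]
      subst hse
      refine ⟨hrch, fun e he => ?_⟩
      by_contra hce
      push_neg at hce
      exact hns2 ⟨e, by omega, he⟩
    · rw [if_neg hse]
      by_cases hc : st.1.contains nxt = true
      · rw [if_pos hc]
        have hres := ih st hMidst hrest
        cases hgo : goNbrsB s st rest with
        | inl r => rw [hgo] at hres; exact hres
        | inr st' =>
          rw [hgo] at hres
          obtain ⟨hMid', hmono, hall⟩ := hres
          refine ⟨hMid', hmono, ?_⟩
          intro x hx
          rcases List.mem_cons.mp hx with rfl | hxr
          · exact ⟨hse, MidB_mono hMidst hMid' hmono x (Std.HashSet.contains_iff_mem.mp hc)⟩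
          · exact hall x hxr
      · rw [if_neg hc]
        have hnotmem : nxt ∉ st.1 := fun h => hc (Std.HashSet.contains_iff_mem.mpr h)
        have hnxtmin : minR t nxt (d + 1) := by
          refine ⟨hrch, fun e he => ?_⟩
          by_contra hce
          push_neg at hce
          exact hnotmem ((hkeys nxt).mpr (Or.inl ⟨e, by omega, he⟩))
        have hMid2 : MidB t d (st.1.insert nxt, st.2 ++ [nxt]) := by
          refine ⟨?_, ?_⟩
          · intro x
            rw [hs_mem_insert, List.mem_append, List.mem_singleton]
            have := hkeys x
            tauto
          · intro x hx
            rcases List.mem_append.mp hx with hold | hq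
            · exact hnew x hold
            · rw [List.mem_singleton] at hq
              subst hq
              exact hnxtmin
        have hres := ih _ hMid2 hrest
        cases hgo : goNbrsB s (st.1.insert nxt, st.2 ++ [nxt]) rest with
        | inl r => rw [hgo] at hres; exact hres
        | inr st' =>
          rw [hgo] at hres
          obtain ⟨hMid', hmono, hall⟩ := hres
          refine ⟨hMid', fun y hy => hmono y (by simp [hy]), ?_⟩
          intro x hx
          rcases List.mem_cons.mp hx with rfl | hxr
          · exact ⟨hse, MidB_mono hMid2 hMid'
              (fun y hy => hmono y hy) x ((hs_mem_insert _ _ _).mpr (Or.inl rfl))⟩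
          · exact hall x hxr

theorem goFrontB_spec {s t : List Int} {d : Nat} (hns2 : ¬ ballP t d s) :
    ∀ (frs : List (List Int)) (st : Std.HashSet (List Int) × List (List Int)),
      MidB t d st → (∀ cur ∈ frs, minR t cur d) →
      (match goFrontB s st frs with
       | Sum.inl _ => minR t s (d + 1)
       | Sum.inr st' => MidB t d st' ∧ (∀ y, y ∈ st.2 → y ∈ st'.2) ∧
           (∀ cur ∈ frs, ∀ x, rStep cur x → x ≠ s ∧ x ∈ st'.1)) := by
  intro frs
  induction frs with
  | nil =>
    intro st hMid _
    simp only [goFrontB]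
    exact ⟨hMid, fun y hy => hy, by simp⟩
  | cons cur rest ih =>
    intro st hMid hfr
    have hcur : minR t cur d := hfr cur (by simp)
    have hres := goNbrsB_spec hns2 hcur (pyNeighbors cur) st hMid (fun x hx => hx)
    cases hgo : goNbrsB s st (pyNeighbors cur) with
    | inl r =>
      rw [hgo] at hres
      simp only [goFrontB, hgo]
      exact hres
    | inr st' =>
      rw [hgo] at hres
      simp only [goFrontB, hgo]
      obtain ⟨hMid', hmono, hall⟩ := hres
      have hres2 := ih st' hMid' (fun c hc => hfr c (by simp [hc]))
      cases hgo2 : goFrontB s st' rest with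
      | inl r => rw [hgo2] at hres2; exact hres2
      | inr st'' =>
        rw [hgo2] at hres2
        obtain ⟨hMid'', hmono2, hall2⟩ := hres2
        refine ⟨hMid'', fun y hy => hmono2 y (hmono y hy), ?_⟩
        intro c hc x hstep
        rcases List.mem_cons.mp hc with rfl | hcr
        · exact ⟨(hall x hstep).1, MidB_mono hMid' hMid'' hmono2 x (hall x hstep).2⟩
        · exact hall2 c hcr x hstep

-- loop invariant of B's while loop: seen = ball of radius d around target,
-- frontier = exact layer d, and start not yet found
def InvBfs (s t : List Int) (seen : Std.HashSet (List Int))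
    (frontier : List (List Int)) (dI : Int) : Prop :=
  ∃ d : Nat, dI = (d : Int) ∧ (∀ x, x ∈ seen ↔ ballP t d x) ∧
    LayerL t d frontier ∧ ¬ ballP t d s

theorem loopBfs_correct (s t : List Int) :
    ∀ (fuel : Nat) (seen : Std.HashSet (List Int)) (frontier : List (List Int)) (dI : Int),
      InvBfs s t seen frontier dI →
      Nat.factorial t.length + 1 ≤ fuel + seen.size →
      ResultSpec s t (loopBfs s fuel seen frontier dI) := by
  intro fuel
  induction fuel with
  | zero =>
    intro seen frontier dI hInv hfuel
    exfalso
    obtain ⟨d, rfl, hseen, hlay, hns⟩ := hInv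
    have := seen_size_le (u := t) (f := d) (fun x hx => (hseen x).mp hx)
    omega
  | succ fuel ih =>
    intro seen frontier dI hInv hfuel
    obtain ⟨d, rfl, hseen, hlay, hns⟩ := hInv
    simp only [loopBfs]
    by_cases hempty : frontier = []
    · rw [if_pos hempty]
      refine Or.inl ⟨rfl, fun e he => ?_⟩
      have hun : ∀ e, ¬ reachN e t s := by
        apply unreach_of_layer_empty (F := d)
        · intro x hx
          have hmem := (hlay x).mpr hx
          rw [hempty] at hmem
          simp at hmem
        · exact hns
      exact hun e (reachN_symm he)
    · rw [if_neg hempty]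
      have hMid0 : MidB t d (seen, []) := by
        refine ⟨?_, ?_⟩
        · intro x
          simp only [List.not_mem_nil, or_false]
          exact hseen x
        · intro x hx
          simp at hx
      have hres := goFrontB_spec hns frontier (seen, []) hMid0
        (fun c hc => (hlay c).mp hc)
      cases hgo : goFrontB s (seen, []) frontier with
      | inl r =>
        rw [hgo] at hres
        refine Or.inr ⟨d + 1, ?_, minR_symm hres⟩
        push_cast
        ring_nf
      | inr st =>
        show ResultSpec s t (loopBfs s fuel st.1 st.2 ((d : Int) + 1))
        rw [hgo] at hres
        obtain ⟨hMid', hmono, hall⟩ := hres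
        obtain ⟨hkeys', hnew'⟩ := hMid'
        have hlay' : ∀ x, x ∈ st.2 ↔ minR t x (d + 1) := by
          intro x
          constructor
          · exact fun h => hnew' x h
          · intro hm
            obtain ⟨y, hy, hs'⟩ := minR_pred hm
            have := hall y ((hlay y).mpr hy) x hs'
            rcases (hkeys' x).mp this.2 with hb' | h2
            · exact absurd hb' (minR_not_ball hm)
            · exact h2
        have hns' : ¬ ballP t (d + 1) s := by
          intro hb'
          rcases (ball_succ_iff t s d).mp hb' with h1 | h2
          · exact hns h1
          · obtain ⟨y, hy, hs'⟩ := minR_pred h2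
            exact (hall y ((hlay y).mpr hy) s hs').1 rfl
        by_cases hnf : st.2 = []
        · have hnone : loopBfs s fuel st.1 st.2 ((d : Int) + 1) = none := by
            rw [hnf]
            cases fuel <;> simp [loopBfs]
          rw [hnone]
          refine Or.inl ⟨rfl, fun e he => ?_⟩
          have hun : ∀ e, ¬ reachN e t s := by
            apply unreach_of_layer_empty (F := d + 1)
            · intro x hx
              have hmem := (hlay' x).mpr hx
              rw [hnf] at hmem
              simp at hmem
            · exact hns'
          exact hun e (reachN_symm he)
        · have hInv' : InvBfs s t st.1 st.2 ((d : Int) + 1) := by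
            refine ⟨d + 1, by push_cast; ring, ?_, hlay', hns'⟩
            intro x
            have hor : (ballP t d x ∨ x ∈ st.2) ↔
                (ballP t d x ∨ minR t x (d + 1)) := or_congr Iff.rfl (hlay' x)
            rw [hkeys' x, hor, ← ball_succ_iff]
          obtain ⟨x0, hx0⟩ := List.exists_mem_of_ne_nil _ hnf
          have hsub : ∀ x ∈ seen.toList, x ∈ st.1.toList := fun x hx =>
            Std.HashSet.mem_toList.mpr
              ((hkeys' x).mpr (Or.inl ((hseen x).mp (Std.HashSet.mem_toList.mp hx))))
          have hx0m : x0 ∈ st.1.toList :=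
            Std.HashSet.mem_toList.mpr ((hkeys' x0).mpr (Or.inr hx0))
          have hx0n : x0 ∉ seen.toList := fun h =>
            minR_not_ball ((hlay' x0).mp hx0)
              ((hseen x0).mp (Std.HashSet.mem_toList.mp h))
          have hlt := length_lt_of_nodup_ssubset (hs_toList_nodup seen) hsub hx0m hx0n
          rw [Std.HashSet.length_toList, Std.HashSet.length_toList] at hlt
          exact ih st.1 st.2 ((d : Int) + 1) hInv' (by omega)

-- ---- top level ----

theorem ResultSpec_unique {s t : List Int} {o₁ o₂ : Option Int}
    (h1 : ResultSpec s t o₁) (h2 : ResultSpec s t o₂) : o₁ = o₂ := by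
  rcases h1 with ⟨ho1, hu1⟩ | ⟨D1, ho1, hm1⟩ <;>
    rcases h2 with ⟨ho2, hu2⟩ | ⟨D2, ho2, hm2⟩
  · rw [ho1, ho2]
  · exact absurd hm2.1 (hu1 D2)
  · exact absurd hm1.1 (hu2 D1)
  · rw [ho1, ho2]
    have : D1 = D2 := le_antisymm (hm1.2 _ hm2.1) (hm2.2 _ hm1.1)
    rw [this]

theorem hm_single_facts (w : List Int) :
    KeysBall w 0 ((∅ : Std.HashMap (List Int) Int).insert w 0) ∧
    ((∅ : Std.HashMap (List Int) Int).insert w 0).size = 1 := by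
  refine ⟨⟨?_, ?_⟩, ?_⟩
  · intro x
    rw [hm_mem_insert, ball_zero]
    simp [eq_comm]
  · intro x m hx hm
    have hxs : x = w := by
      rcases (hm_mem_insert _ _ _ _).mp hx with h | h
      · exact h
      · simp at h
    subst hxs
    have hm0 : m = 0 := by
      have := hm.2 0 rfl
      omega
    subst hm0
    rw [Std.HashMap.getD_insert_self]
    norm_num
  · rw [Std.HashMap.size_insert]
    simp

theorem layer_single (w : List Int) : LayerL w 0 [w] := by
  intro x
  rw [minR_zero]
  simp [eq_comm]

theorem A_result (s t : List Int) : ResultSpec s t (reversal_dist s t) := by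
  unfold reversal_dist
  by_cases hst : s = t
  · subst hst
    rw [if_pos rfl]
    exact Or.inr ⟨0, by norm_num, (minR_zero s s).mpr rfl⟩
  · rw [if_neg hst]
    apply loopA_correct
    · refine ⟨s, t, 0, 0, Or.inl ⟨rfl, rfl⟩, (hm_single_facts s).1, (hm_single_facts t).1,
        layer_single s, layer_single t, ?_⟩
      intro x h1 h2
      rw [ball_zero] at h1 h2
      exact hst (h1.trans h2.symm)
    · rw [(hm_single_facts s).2, (hm_single_facts t).2]
      omega

theorem B_result (s t : List Int) : ResultSpec s t (reversal_dist_alt s t) := by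
  unfold reversal_dist_alt
  by_cases hst : s = t
  · subst hst
    rw [if_pos rfl]
    exact Or.inr ⟨0, by norm_num, (minR_zero s s).mpr rfl⟩
  · rw [if_neg hst]
    by_cases hsrt : PySem.List.sorted s (fun x => x) false ≠ PySem.List.sorted t (fun x => x) false
    · rw [if_pos hsrt]
      refine Or.inl ⟨rfl, fun e he => ?_⟩
      exact hsrt ((PySem.List.sorted_id_eq_sorted_id_iff_perm s t).mpr
        ((reachN_permOf he).symm))
    · rw [if_neg hsrt]
      apply loopBfs_correct
      · refine ⟨0, by norm_num, ?_, layer_single t, ?_⟩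
        · intro x
          rw [hs_mem_insert, ball_zero]
          simp [eq_comm]
        · intro h
          rw [ball_zero] at h
          exact hst h.symm
      · rw [Std.HashSet.size_insert]
        simp

-- ===== VERDICT (by name: the statement is the Claim_ definition above) =====
theorem reversal_dist_spec : Claim_equal_reversal_dist := by
  intro s t _
  unfold Spec_reversal_dist
  exact ResultSpec_unique (A_result s t) (B_result s t)
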